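-- pv_equiv track=rewrite | github.com/bbtufty/seadexarr | seadexarr/core/filters.py | filter_already_downloaded
-- ===== SOURCE A (Python) =====
-- from typing import Any
--
-- def filter_already_downloaded(
--     releases: list[dict[str, Any]], existing_files: list[str]
-- ) -> list[dict[str, Any]]:
--     """Filter out releases that have already been downloaded."""
--     if not existing_files:
--         return releases
--
--     existing_lower = [f.lower() for f in existing_files]
--
--     def not_downloaded(release: dict[str, Any]) -> bool:
--         filename = release.get("filename", "").lower()
--         title = release.get("title", "").lower()
--
--         return not any(
--             existing in filename or existing in title for existing in existing_lower
--         )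
--
--     return [release for release in releases if not_downloaded(release)]
-- ===== SOURCE B (Python) =====
-- def filter_already_downloaded(releases, existing_files):
--     """Sieve formulation: pre-lower each release's texts once, then filter the
--     surviving releases pattern by pattern."""
--     tagged = [
--         (release,
--          release.get("filename", "").lower(),
--          release.get("title", "").lower())
--         for release in releases
--     ]
--     for pattern in existing_files:
--         p = pattern.lower()
--         tagged = [t for t in tagged if p not in t[1] and p not in t[2]]
--     return [t[0] for t in tagged]
-- ===== Notes on version B (the rewrite author's own statement) =====
-- stated objective: alternative
-- what changed: B swaps the loop nesting: instead of testing every pattern inside a per-release predicate, it pre-lowers each release's filename/title once and then sieves the release list by one filter pass per existing file, proving the traversal order does not matter.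
import Mathlib
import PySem

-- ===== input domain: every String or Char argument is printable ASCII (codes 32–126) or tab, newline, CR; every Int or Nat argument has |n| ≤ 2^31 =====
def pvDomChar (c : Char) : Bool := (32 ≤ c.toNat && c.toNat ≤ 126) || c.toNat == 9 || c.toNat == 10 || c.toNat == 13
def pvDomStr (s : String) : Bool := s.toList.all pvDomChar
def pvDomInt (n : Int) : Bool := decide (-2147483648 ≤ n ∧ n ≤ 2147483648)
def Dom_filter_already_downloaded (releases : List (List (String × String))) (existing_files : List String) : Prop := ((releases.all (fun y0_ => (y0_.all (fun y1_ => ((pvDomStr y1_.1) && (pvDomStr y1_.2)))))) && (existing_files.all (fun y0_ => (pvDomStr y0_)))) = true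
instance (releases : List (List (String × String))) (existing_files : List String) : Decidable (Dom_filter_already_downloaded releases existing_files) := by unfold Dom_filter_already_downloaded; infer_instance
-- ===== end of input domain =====

-- B swaps the loop nesting: it pre-lowers each release's texts once, then sieves the
-- release list with one filter pass per existing file (alternative decomposition, same cost).

-- ===== PORT A =====
def filter_already_downloaded (releases : List (List (String × String))) (existing_files : List String) : List (List (String × String)) :=
  if existing_files = [] then releases
  else
    let existing_lower := existing_files.map PySem.Str.lower
    let not_downloaded := fun (release : List (String × String)) =>
      let filename := PySem.Str.lower ((PySem.Dict.mk release).getD "filename" "")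
      let title := PySem.Str.lower ((PySem.Dict.mk release).getD "title" "")
      !(existing_lower.any (fun existing =>
          PySem.Str.isIn existing filename || PySem.Str.isIn existing title))
    releases.filter not_downloaded

-- ===== PORT B =====
def filter_already_downloaded_alt (releases : List (List (String × String))) (existing_files : List String) : List (List (String × String)) :=
  let tagged := releases.map (fun release =>
    (release,
     PySem.Str.lower ((PySem.Dict.mk release).getD "filename" ""),
     PySem.Str.lower ((PySem.Dict.mk release).getD "title" "")))
  let sieved := existing_files.foldl (fun ts pattern =>
      let p := PySem.Str.lower pattern
      ts.filter (fun t => !(PySem.Str.isIn p t.2.1) && !(PySem.Str.isIn p t.2.2))) tagged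
  sieved.map (fun t => t.1)

-- ===== PRECONDITION & SPEC =====
def Spec_filter_already_downloaded (releases : List (List (String × String))) (existing_files : List String) (out : List (List (String × String))) : Prop := out = filter_already_downloaded_alt releases existing_files
instance (releases : List (List (String × String))) (existing_files : List String) (out : List (List (String × String))) : Decidable (Spec_filter_already_downloaded releases existing_files out) := by unfold Spec_filter_already_downloaded; infer_instance

-- ===== CLAIM (what is proved, stated in full; the proofs are below) =====
def Claim_equal_filter_already_downloaded : Prop := ∀ (releases : List (List (String × String))) (existing_files : List String), Dom_filter_already_downloaded releases existing_files → Spec_filter_already_downloaded releases existing_files (filter_already_downloaded releases existing_files)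

-- ===== LEMMAS AND PROOFS =====

-- a left fold of filters over the pattern list is one filter by the conjunction of all patterns
theorem foldl_filter_eq_filter_all {α β : Type} (q : β → α → Bool) :
    ∀ (pats : List β) (ts : List α),
      pats.foldl (fun ts p => ts.filter (q p)) ts
        = ts.filter (fun t => pats.all (fun p => q p t)) := by
  intro pats
  induction pats with
  | nil => intro ts; simp
  | cons p ps ih =>
      intro ts
      simp only [List.foldl_cons, ih, List.filter_filter, List.all_cons]
      exact List.filter_congr (fun a _ => by rw [Bool.and_comm])

theorem not_any_map_lower (ef : List String) (f g : String → Bool) :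
    (!(ef.map PySem.Str.lower).any (fun e => f e || g e))
      = ef.all (fun p => !f (PySem.Str.lower p) && !g (PySem.Str.lower p)) := by
  induction ef with
  | nil => rfl
  | cons e es ih =>
      simp only [List.map_cons, List.any_cons, List.all_cons, Bool.not_or, ← ih]

theorem filter_already_downloaded_spec : Claim_equal_filter_already_downloaded := by
  intro releases existing_files _
  unfold Spec_filter_already_downloaded filter_already_downloaded filter_already_downloaded_alt
  simp only [foldl_filter_eq_filter_all, List.filter_map, List.map_map]
  by_cases h : existing_files = []
  · simp [h, Function.comp_def]
  · simp only [if_neg h, Function.comp_def, List.map_id_fun', id]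
    apply List.filter_congr
    intro r _
    exact not_any_map_lower existing_files _ _
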